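-- pv_equiv track=rewrite | github.com/ziembamilosz/asd-course | lab13/dynamic.py | matching_patterns
-- ===== SOURCE A (Python) =====
-- def matching_patterns(P, T):
--     D = []
--     parents = []
--     for i in range(len(P)):
--         row_D = []
--         row_parents = []
--         for j in range(len(T)):
--             if i == 0 and j == 0:
--                 row_D.append(j)
--                 row_parents.append('X')
--             elif j == 0:
--                 row_D.append(i)
--                 row_parents.append('D')
--             elif i == 0:
--                 row_D.append(0)
--                 row_parents.append('X')
--             else:
--                 row_D.append(0)
--                 row_parents.append('X')
--         D.append(row_D)
--         parents.append(row_parents)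
--
--     for i in range(1, len(P)):
--         for j in range(1, len(T)):
--             swaps = D[i - 1][j - 1] + int(P[i] != T[j])
--             inserts = D[i][j - 1] + 1
--             deletes = D[i - 1][j] + 1
--             lowest_cost = min(swaps, inserts, deletes)
--             D[i][j] = lowest_cost
--             if lowest_cost == swaps:
--                 if P[i] == T[j]:
--                     parents[i][j] = 'M'
--                 else:
--                     parents[i][j] = 'S'
--             elif lowest_cost == inserts:
--                 parents[i][j] = 'I'
--             else:
--                  parents[i][j] = 'D'
--     i = len(P) - 1
--     j = 0
--     for k in range(1, len(T)):
--         if D[i][k] < D[i][j]: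
--             j = k
--     return j - len(P) + 2
-- ===== SOURCE B (Python) =====
-- def matching_patterns(P, T):
--     # Top-down memoized recursion on the same cost relation; no tables, no
--     # parents, the argmin queries the recursive scorer directly. Constant-factor
--     # slower than A and, being recursive, bound by Python's recursion limit on
--     # very long inputs.
--     m = len(P)
--     memo = {}
--
--     def d(i, j):
--         if (i, j) not in memo:
--             if j == 0:
--                 memo[(i, j)] = i
--             elif i == 0:
--                 memo[(i, j)] = 0
--             else:
--                 memo[(i, j)] = min(d(i - 1, j - 1) + (P[i] != T[j]),
--                                    d(i, j - 1) + 1,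
--                                    d(i - 1, j) + 1)
--         return memo[(i, j)]
--
--     best = 0
--     for k in range(1, len(T)):
--         if d(m - 1, k) < d(m - 1, best):
--             best = k
--     return best - m + 2
-- ===== Notes on version B (the rewrite author's own statement) =====
-- stated objective: alternative
-- what changed: Replaces A's bottom-up in-place fill of a full len(P) x len(T) matrix plus an unused parents table by a top-down memoized recursive scorer that the final earliest-tie argmin loop queries directly; no tables are built.
import Mathlib
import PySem

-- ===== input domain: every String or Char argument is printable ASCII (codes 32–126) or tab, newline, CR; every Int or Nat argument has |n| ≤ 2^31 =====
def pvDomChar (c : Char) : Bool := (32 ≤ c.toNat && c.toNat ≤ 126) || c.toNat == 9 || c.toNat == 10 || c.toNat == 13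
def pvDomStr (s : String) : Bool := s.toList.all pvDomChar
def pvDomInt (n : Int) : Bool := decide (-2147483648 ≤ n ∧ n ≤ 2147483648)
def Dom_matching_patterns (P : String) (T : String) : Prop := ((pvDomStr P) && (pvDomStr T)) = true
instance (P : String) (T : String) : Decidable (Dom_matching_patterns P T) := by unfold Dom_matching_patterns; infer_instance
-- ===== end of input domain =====

-- B replaces A's bottom-up in-place fill of a full DP matrix (plus an unused parents
-- table) by a top-down memoized recursive scorer queried by the final argmin loop:
-- an alternative decomposition, same asymptotic cost.

-- ===== PORT A =====
-- matrix indexing helpers for A's in-place updates (exact: A only reads/writes in-range cells)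
def pvGetE (M : List (List Int)) (i j : Nat) : Int := (M.getD i []).getD j 0
def pvSetE {α : Type} (M : List (List α)) (i j : Nat) (v : α) : List (List α) :=
  M.set i ((M.getD i []).set j v)

-- literal transliteration of A on the character lists (row-major matrix D plus parents,
-- filled in place, then the earliest-tie argmin over the bottom row)
def pvACore (Pl Tl : List Char) : Int :=
  let m := Pl.length
  let n := Tl.length
  let init := (List.range m).foldl (fun (acc : List (List Int) × List (List Char)) (i : Nat) =>
    let row := (List.range n).foldl (fun (r : List Int × List Char) (j : Nat) =>
      if i = 0 ∧ j = 0 then (r.1 ++ [(j : Int)], r.2 ++ ['X'])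
      else if j = 0 then (r.1 ++ [(i : Int)], r.2 ++ ['D'])
      else if i = 0 then (r.1 ++ [(0 : Int)], r.2 ++ ['X'])
      else (r.1 ++ [(0 : Int)], r.2 ++ ['X'])) ([], [])
    (acc.1 ++ [row.1], acc.2 ++ [row.2])) ([], [])
  let filled := (List.range' 1 (m - 1)).foldl (fun (DPar : List (List Int) × List (List Char)) (i : Nat) =>
    (List.range' 1 (n - 1)).foldl (fun (DPar : List (List Int) × List (List Char)) (j : Nat) =>
      let D := DPar.1
      let par := DPar.2
      let swaps := pvGetE D (i-1) (j-1) + (if Pl.getD i ' ' ≠ Tl.getD j ' ' then (1:Int) else 0)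
      let inserts := pvGetE D i (j-1) + 1
      let deletes := pvGetE D (i-1) j + 1
      let lowest := min swaps (min inserts deletes)
      (pvSetE D i j lowest,
       if lowest = swaps then
         (if Pl.getD i ' ' = Tl.getD j ' ' then pvSetE par i j 'M' else pvSetE par i j 'S')
       else if lowest = inserts then pvSetE par i j 'I'
       else pvSetE par i j 'D')) DPar) init
  let jfin := (List.range' 1 (n - 1)).foldl
    (fun (j : Nat) (k : Nat) => if pvGetE filled.1 (m-1) k < pvGetE filled.1 (m-1) j then k else j) 0
  (jfin : Int) - (m : Int) + 2

def matching_patterns (P : String) (T : String) : Int := pvACore P.toList T.toList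

-- ===== PORT B =====
-- literal transliteration of B's memoized recursive scorer d(i, j): the memo dict is
-- threaded through as state (check first, compute and store on a miss, same call order)
def pvDm (Pl Tl : List Char) (i j : Nat) (memo : PySem.Dict (Nat × Nat) Int) :
    Int × PySem.Dict (Nat × Nat) Int :=
  match memo.get? (i, j) with
  | some v => (v, memo)
  | none =>
    if _hj : j = 0 then ((i : Int), memo.insert (i, j) (i : Int))
    else if _hi : i = 0 then ((0 : Int), memo.insert (i, j) (0 : Int))
    else
      let r1 := pvDm Pl Tl (i - 1) (j - 1) memo
      let r2 := pvDm Pl Tl i (j - 1) r1.2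
      let r3 := pvDm Pl Tl (i - 1) j r2.2
      let v := min (r1.1 + (if Pl.getD i ' ' ≠ Tl.getD j ' ' then (1:Int) else 0))
                 (min (r2.1 + 1) (r3.1 + 1))
      (v, r3.2.insert (i, j) v)
  termination_by i + j
  decreasing_by all_goals omega

-- B's argmin loop body: query the scorer at k and at the current best, keep the smaller
def pvBStep (Pl Tl : List Char) (m : Nat) (st : Nat × PySem.Dict (Nat × Nat) Int) (k : Nat) :
    Nat × PySem.Dict (Nat × Nat) Int :=
  let r1 := pvDm Pl Tl (m - 1) k st.2
  let r2 := pvDm Pl Tl (m - 1) st.1 r1.2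
  if r1.1 < r2.1 then (k, r2.2) else (st.1, r2.2)

def pvBCore (Pl Tl : List Char) : Int :=
  ((((List.range' 1 (Tl.length - 1)).foldl (pvBStep Pl Tl Pl.length)
      (0, PySem.Dict.empty)).1 : Nat) : Int) - (Pl.length : Int) + 2

def matching_patterns_alt (P : String) (T : String) : Int := pvBCore P.toList T.toList

-- ===== PRECONDITION & SPEC =====
-- Pre_ excludes exactly the inputs on which the Python A raises IndexError
-- (empty P with len(T) >= 2); B's recursion raises IndexError there too.
def Pre_matching_patterns (P : String) (T : String) : Prop :=
  P.toList ≠ [] ∨ T.toList.length ≤ 1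
instance (P : String) (T : String) : Decidable (Pre_matching_patterns P T) := by
  unfold Pre_matching_patterns; infer_instance

def pvWitness_matching_patterns : String × String := ("ab", "abc")

def Spec_matching_patterns (P : String) (T : String) (out : Int) : Prop := out = matching_patterns_alt P T
instance (P : String) (T : String) (out : Int) : Decidable (Spec_matching_patterns P T out) := by unfold Spec_matching_patterns; infer_instance

-- ===== CLAIM (what is proved, stated in full; the proofs are below) =====
def Claim_equal_matching_patterns : Prop := ∀ (P : String) (T : String), Dom_matching_patterns P T → Pre_matching_patterns P T → Spec_matching_patterns P T (matching_patterns P T)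

-- ===== LEMMAS AND PROOFS =====

-- the common specification: the DP cell value D[i][j] both programs compute
def pvD (Pl Tl : List Char) : Nat → Nat → Int
  | i, 0 => (i : Int)
  | 0, _+1 => 0
  | i+1, j+1 =>
      min (pvD Pl Tl i j + (if Pl.getD (i+1) ' ' ≠ Tl.getD (j+1) ' ' then (1:Int) else 0))
        (min (pvD Pl Tl (i+1) j + 1) (pvD Pl Tl i (j+1) + 1))
  termination_by i j => (i, j)

-- rows of A's matrix at the various loop stages
def pvInitRow (n i : Nat) : List Int := (List.range n).map (fun j => if j = 0 then (i:Int) else 0)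
def pvDRow (Pl Tl : List Char) (n i : Nat) : List Int := (List.range n).map (fun j => pvD Pl Tl i j)
def pvPartRow (Pl Tl : List Char) (n i j : Nat) : List Int :=
  (List.range n).map (fun j' => if j' ≤ j then pvD Pl Tl i j' else if j' = 0 then (i:Int) else 0)
def pvMix (Pl Tl : List Char) (m n i : Nat) : List (List Int) :=
  (List.range m).map (fun i' => if i' ≤ i then pvDRow Pl Tl n i' else pvInitRow n i')
def pvMixP (Pl Tl : List Char) (m n i j : Nat) : List (List Int) :=
  (List.range m).map (fun i' =>
    if i' < i then pvDRow Pl Tl n i'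
    else if i' = i then pvPartRow Pl Tl n i j
    else pvInitRow n i')

-- A's D-only inner-loop step
def pvAStep (Pl Tl : List Char) (i : Nat) (D : List (List Int)) (j : Nat) : List (List Int) :=
  pvSetE D i j
    (min (pvGetE D (i-1) (j-1) + (if Pl.getD i ' ' ≠ Tl.getD j ' ' then (1:Int) else 0))
      (min (pvGetE D i (j-1) + 1) (pvGetE D (i-1) j + 1)))

-- generic: first component of a pair fold whose first component ignores the second
theorem pv_foldl_fst {γ α β : Type} (l : List γ) (step : α × β → γ → α × β) (f : α → γ → α)
    (h : ∀ st x, (step st x).1 = f st.1 x) (st0 : α × β) :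
    (l.foldl step st0).1 = l.foldl f st0.1 := by
  induction l generalizing st0 with
  | nil => rfl
  | cons x xs ih => simp only [List.foldl_cons, ih, h]

theorem pv_getD_map_range {α : Type} (f : Nat → α) (n j : Nat) (d : α) (h : j < n) :
    ((List.range n).map f).getD j d = f j := by
  rw [List.getD_eq_getElem _ _ (by simpa using h)]; simp

theorem pv_set_map_range {α : Type} (f : Nat → α) (m i : Nat) (r : α) :
    ((List.range m).map f).set i r = (List.range m).map (fun k => if k = i then r else f k) := by
  apply List.ext_getElem (by simp)
  intro k h1 h2
  simp only [List.getElem_set, List.getElem_map, List.getElem_range]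
  by_cases h : i = k
  · simp [h]
  · simp [h, Ne.symm h]

theorem pv_map_range_congr {α : Type} (f g : Nat → α) (n : Nat) (h : ∀ k, k < n → f k = g k) :
    (List.range n).map f = (List.range n).map g := by
  apply List.map_congr_left; intro k hk; exact h k (List.mem_range.mp hk)

theorem pv_getE_map_range (f : Nat → List Int) (m i j : Nat) (hi : i < m) :
    pvGetE ((List.range m).map f) i j = (f i).getD j 0 := by
  unfold pvGetE; rw [pv_getD_map_range f m i [] hi]

-- pvD base values
theorem pvD_zero_right (Pl Tl : List Char) (i : Nat) : pvD Pl Tl i 0 = (i : Int) := by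
  cases i <;> simp [pvD]

theorem pvD_zero_left (Pl Tl : List Char) (j : Nat) : pvD Pl Tl 0 j = 0 := by
  cases j <;> simp [pvD]

-- A side ------------------------------------------------------------------

theorem pvA_init (Pl Tl : List Char) :
    ((List.range Pl.length).foldl (fun (acc : List (List Int) × List (List Char)) (i : Nat) =>
      (acc.1 ++ [((List.range Tl.length).foldl (fun (r : List Int × List Char) (j : Nat) =>
        if i = 0 ∧ j = 0 then (r.1 ++ [(j : Int)], r.2 ++ ['X'])
        else if j = 0 then (r.1 ++ [(i : Int)], r.2 ++ ['D'])
        else if i = 0 then (r.1 ++ [(0 : Int)], r.2 ++ ['X'])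
        else (r.1 ++ [(0 : Int)], r.2 ++ ['X'])) ([], [])).1],
       acc.2 ++ [((List.range Tl.length).foldl (fun (r : List Int × List Char) (j : Nat) =>
        if i = 0 ∧ j = 0 then (r.1 ++ [(j : Int)], r.2 ++ ['X'])
        else if j = 0 then (r.1 ++ [(i : Int)], r.2 ++ ['D'])
        else if i = 0 then (r.1 ++ [(0 : Int)], r.2 ++ ['X'])
        else (r.1 ++ [(0 : Int)], r.2 ++ ['X'])) ([], [])).2])) ([], [])).1
    = pvMix Pl Tl Pl.length Tl.length 0 := by
  rw [pv_foldl_fst _ _ (fun (acc1 : List (List Int)) (i : Nat) => acc1 ++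
      [(List.range Tl.length).map (fun (j : Nat) => if i = 0 ∧ j = 0 then (j : Int) else if j = 0 then (i : Int) else 0)])]
  · rw [PySem.List.foldl_append_singleton_eq_map]
    simp only [List.nil_append]
    unfold pvMix
    apply pv_map_range_congr
    intro i _
    by_cases hi0 : i = 0
    · subst hi0
      simp only [Nat.le_refl, if_pos]
      unfold pvDRow
      apply pv_map_range_congr
      intro j _
      rw [pvD_zero_left]
      split_ifs <;> simp_all
    · rw [if_neg (by omega)]
      unfold pvInitRow
      apply pv_map_range_congr
      intro j _
      split_ifs <;> simp_all
  · intro st x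
    simp only
    congr 1
    rw [pv_foldl_fst _ _ (fun (r1 : List Int) (j : Nat) => r1 ++ [if x = 0 ∧ j = 0 then (j : Int) else if j = 0 then (x : Int) else 0])]
    · rw [PySem.List.foldl_append_singleton_eq_map]; simp
    · intro r j; split_ifs <;> rfl

theorem pvA_step (Pl Tl : List Char) (m n i t : Nat) (hi1 : 1 ≤ i) (him : i < m) (ht : t + 1 ≤ n - 1) :
    pvAStep Pl Tl i (pvMixP Pl Tl m n i t) (t+1) = pvMixP Pl Tl m n i (t+1) := by
  obtain ⟨i', rfl⟩ : ∃ i', i = i' + 1 := ⟨i - 1, by omega⟩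
  have htn : t < n := by omega
  have ht1 : t + 1 < n := by omega
  have e1 : pvGetE (pvMixP Pl Tl m n (i'+1) t) i' t = pvD Pl Tl i' t := by
    unfold pvMixP
    rw [pv_getE_map_range _ _ _ _ (by omega), if_pos (by omega)]
    unfold pvDRow
    exact pv_getD_map_range _ _ _ _ htn
  have e2 : pvGetE (pvMixP Pl Tl m n (i'+1) t) (i'+1) t = pvD Pl Tl (i'+1) t := by
    unfold pvMixP
    rw [pv_getE_map_range _ _ _ _ him, if_neg (by omega), if_pos rfl]
    unfold pvPartRow
    rw [pv_getD_map_range _ _ _ _ htn, if_pos (by omega)]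
  have e3 : pvGetE (pvMixP Pl Tl m n (i'+1) t) i' (t+1) = pvD Pl Tl i' (t+1) := by
    unfold pvMixP
    rw [pv_getE_map_range _ _ _ _ (by omega), if_pos (by omega)]
    unfold pvDRow
    exact pv_getD_map_range _ _ _ _ ht1
  unfold pvAStep
  simp only [Nat.add_sub_cancel, e1, e2, e3]
  have hv : min (pvD Pl Tl i' t + (if Pl.getD (i'+1) ' ' ≠ Tl.getD (t+1) ' ' then (1:Int) else 0))
      (min (pvD Pl Tl (i'+1) t + 1) (pvD Pl Tl i' (t+1) + 1)) = pvD Pl Tl (i'+1) (t+1) := by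
    rw [pvD]
  rw [hv]
  unfold pvSetE
  conv_lhs => rw [pvMixP]
  rw [pv_getD_map_range _ _ _ _ him, if_neg (by omega), if_pos rfl]
  unfold pvPartRow
  rw [pv_set_map_range, pv_set_map_range]
  unfold pvMixP
  apply pv_map_range_congr
  intro k hk
  by_cases hki : k = i' + 1
  · subst hki
    rw [if_pos rfl, if_neg (by omega), if_pos rfl]
    unfold pvPartRow
    apply pv_map_range_congr
    intro j' _
    by_cases hj : j' = t + 1
    · subst hj; rw [if_pos rfl, if_pos (by omega)]
    · rw [if_neg hj]
      split_ifs <;> first | rfl | omega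
  · rw [if_neg hki]
    split_ifs <;> simp_all

theorem pv_range'_succ (t : Nat) : List.range' 1 (t+1) = List.range' 1 t ++ [t+1] := by
  rw [List.range'_concat]
  simp [Nat.add_comm]

theorem pvA_inner (Pl Tl : List Char) (m n i : Nat) (hi1 : 1 ≤ i) (him : i < m) :
    ∀ t, t ≤ n - 1 →
    (List.range' 1 t).foldl (pvAStep Pl Tl i) (pvMixP Pl Tl m n i 0) = pvMixP Pl Tl m n i t := by
  intro t
  induction t with
  | zero => intro _; rfl
  | succ t ih =>
    intro ht
    rw [pv_range'_succ, List.foldl_append, ih (by omega)]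
    simp only [List.foldl_cons, List.foldl_nil]
    exact pvA_step Pl Tl m n i t hi1 him ht

theorem pvA_inner_mix (Pl Tl : List Char) (m n i : Nat) (hi1 : 1 ≤ i) (him : i < m) :
    (List.range' 1 (n-1)).foldl (pvAStep Pl Tl i) (pvMix Pl Tl m n (i-1)) = pvMix Pl Tl m n i := by
  by_cases hn : n = 0
  · subst hn
    simp only [Nat.zero_sub, List.range'_zero, List.foldl_nil]
    unfold pvMix
    apply pv_map_range_congr
    intro k _
    have h1 : pvDRow Pl Tl 0 k = pvInitRow 0 k := rfl
    split_ifs <;> simp [h1]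
  · have hmix0 : pvMix Pl Tl m n (i-1) = pvMixP Pl Tl m n i 0 := by
      unfold pvMix pvMixP
      apply pv_map_range_congr
      intro k _
      by_cases hki : k = i
      · subst hki
        have hrow : pvInitRow n k = pvPartRow Pl Tl n k 0 := by
          unfold pvInitRow pvPartRow
          apply pv_map_range_congr
          intro j' _
          by_cases hj : j' = 0
          · subst hj; simp [pvD_zero_right]
          · rw [if_neg hj, if_neg (by omega : ¬ j' ≤ 0)]
        rw [if_neg (by omega : ¬ k ≤ k - 1), if_neg (by omega : ¬ k < k), if_pos rfl, hrow]
      · split_ifs <;> first | rfl | omega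
    have hmix1 : pvMixP Pl Tl m n i (n-1) = pvMix Pl Tl m n i := by
      unfold pvMix pvMixP
      apply pv_map_range_congr
      intro k _
      by_cases hki : k = i
      · subst hki
        rw [if_neg (by omega : ¬ k < k), if_pos rfl, if_pos (by omega : k ≤ k)]
        unfold pvPartRow pvDRow
        apply pv_map_range_congr
        intro j' hj'
        rw [if_pos (by omega : j' ≤ n - 1)]
      · split_ifs <;> first | rfl | omega
    rw [hmix0, pvA_inner Pl Tl m n i hi1 him (n-1) (Nat.le_refl _), hmix1]

theorem pvA_outer (Pl Tl : List Char) (m n : Nat) :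
    ∀ s, s ≤ m - 1 →
    (List.range' 1 s).foldl (fun D i => (List.range' 1 (n-1)).foldl (pvAStep Pl Tl i) D)
      (pvMix Pl Tl m n 0) = pvMix Pl Tl m n s := by
  intro s
  induction s with
  | zero => intro _; rfl
  | succ s ih =>
    intro hs
    rw [pv_range'_succ, List.foldl_append, ih (by omega)]
    simp only [List.foldl_cons, List.foldl_nil]
    have := pvA_inner_mix Pl Tl m n (s+1) (by omega) (by omega)
    simpa using this

-- B side ------------------------------------------------------------------

-- memo invariant: every stored value is the corresponding pvD cell
def pvInv (Pl Tl : List Char) (memo : PySem.Dict (Nat × Nat) Int) : Prop :=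
  ∀ (p : Nat × Nat) (v : Int), memo.get? p = some v → v = pvD Pl Tl p.1 p.2

theorem pvInv_insert (Pl Tl : List Char) (memo : PySem.Dict (Nat × Nat) Int)
    (h : pvInv Pl Tl memo) (i j : Nat) (v : Int) (hv : v = pvD Pl Tl i j) :
    pvInv Pl Tl (memo.insert (i, j) v) := by
  intro p w hw
  rcases eq_or_ne p (i, j) with rfl | hne
  · rw [PySem.Dict.get?_insert, if_pos rfl] at hw
    cases hw
    exact hv
  · rw [PySem.Dict.get?_insert, if_neg hne] at hw
    exact h p w hw

theorem pvDm_spec (Pl Tl : List Char) (n : Nat) :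
    ∀ (i j : Nat), i + j < n → ∀ (memo : PySem.Dict (Nat × Nat) Int), pvInv Pl Tl memo →
    (pvDm Pl Tl i j memo).1 = pvD Pl Tl i j ∧ pvInv Pl Tl (pvDm Pl Tl i j memo).2 := by
  induction n with
  | zero => intro i j hij; omega
  | succ n ih =>
    intro i j hij memo hm
    rw [pvDm]
    cases hget : memo.get? (i, j) with
    | some v =>
      exact ⟨hm _ _ hget, hm⟩
    | none =>
      by_cases hj : j = 0
      · subst hj
        rw [dif_pos rfl]
        refine ⟨by simp [pvD_zero_right], ?_⟩
        exact pvInv_insert Pl Tl memo hm i 0 _ (by simp [pvD_zero_right])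
      · rw [dif_neg hj]
        by_cases hi : i = 0
        · subst hi
          rw [dif_pos rfl]
          refine ⟨by simp [pvD_zero_left], ?_⟩
          exact pvInv_insert Pl Tl memo hm 0 j _ (by simp [pvD_zero_left])
        · rw [dif_neg hi]
          obtain ⟨i', rfl⟩ : ∃ i', i = i' + 1 := ⟨i - 1, by omega⟩
          obtain ⟨j', rfl⟩ : ∃ j', j = j' + 1 := ⟨j - 1, by omega⟩
          have h1 := ih (i'+1-1) (j'+1-1) (by omega) memo hm
          have h2 := ih (i'+1) (j'+1-1) (by omega) _ h1.2
          have h3 := ih (i'+1-1) (j'+1) (by omega) _ h2.2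
          have hval : min ((pvDm Pl Tl (i'+1-1) (j'+1-1) memo).1
                + (if Pl.getD (i'+1) ' ' ≠ Tl.getD (j'+1) ' ' then (1:Int) else 0))
              (min ((pvDm Pl Tl (i'+1) (j'+1-1) (pvDm Pl Tl (i'+1-1) (j'+1-1) memo).2).1 + 1)
                ((pvDm Pl Tl (i'+1-1) (j'+1) (pvDm Pl Tl (i'+1) (j'+1-1) (pvDm Pl Tl (i'+1-1) (j'+1-1) memo).2).2).1 + 1))
              = pvD Pl Tl (i'+1) (j'+1) := by
            rw [h1.1, h2.1, h3.1]
            simp only [Nat.add_sub_cancel]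
            rw [pvD]
          exact ⟨hval, pvInv_insert Pl Tl _ h3.2 (i'+1) (j'+1) _ hval⟩

theorem pvB_fold (Pl Tl : List Char) (m : Nat) :
    ∀ (l : List Nat) (b : Nat) (memo : PySem.Dict (Nat × Nat) Int), pvInv Pl Tl memo →
    (l.foldl (pvBStep Pl Tl m) (b, memo)).1
      = l.foldl (fun b k => if pvD Pl Tl (m-1) k < pvD Pl Tl (m-1) b then k else b) b := by
  intro l
  induction l with
  | nil => intro b memo _; rfl
  | cons x xs ih =>
    intro b memo hm
    have h1 := pvDm_spec Pl Tl ((m-1) + x + 1) (m-1) x (by omega) memo hm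
    have h2 := pvDm_spec Pl Tl ((m-1) + b + 1) (m-1) b (by omega) _ h1.2
    simp only [List.foldl_cons, pvBStep]
    rw [h1.1, h2.1]
    split
    · exact ih x _ h2.2
    · exact ih b _ h2.2

-- argmin congruence --------------------------------------------------------

theorem pv_argmin_congr (f g : Nat → Int) (n : Nat) (hfg : ∀ k, k < n → f k = g k) :
    ∀ (l : List Nat), (∀ x ∈ l, x < n) → ∀ b, b < n →
    l.foldl (fun b k => if f k < f b then k else b) b
      = l.foldl (fun b k => if g k < g b then k else b) b := by
  intro l
  induction l with
  | nil => intro _ b _; rfl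
  | cons x xs ih =>
    intro hl b hb
    have hx : x < n := hl x (List.mem_cons_self ..)
    simp only [List.foldl_cons, hfg x hx, hfg b hb]
    split
    · exact ih (fun y hy => hl y (List.mem_cons_of_mem _ hy)) x hx
    · exact ih (fun y hy => hl y (List.mem_cons_of_mem _ hy)) b hb

-- the core equivalence -----------------------------------------------------

theorem pv_mem_range'_lt (n x : Nat) (hx : x ∈ List.range' 1 (n - 1)) : x < n := by
  have := List.mem_range'_1.mp hx
  omega

theorem pv_core_eq (Pl Tl : List Char) (h : Pl ≠ [] ∨ Tl.length ≤ 1) :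
    pvACore Pl Tl = pvBCore Pl Tl := by
  by_cases hn1 : Tl.length ≤ 1
  · have h0 : Tl.length - 1 = 0 := by omega
    simp [pvACore, pvBCore, h0]
  · have hm : 1 ≤ Pl.length := by
      rcases h with h | h
      · exact List.length_pos_of_ne_nil h
      · omega
    have hn : 1 ≤ Tl.length := by omega
    have hmem : ∀ x ∈ List.range' 1 (Tl.length - 1), x < Tl.length :=
      pv_mem_range'_lt Tl.length
    have hA : pvACore Pl Tl = ((List.range' 1 (Tl.length - 1)).foldl
        (fun j k => if pvD Pl Tl (Pl.length-1) k < pvD Pl Tl (Pl.length-1) j then k else j) 0 : Nat)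
        - (Pl.length : Int) + 2 := by
      have hfgA : ∀ k, k < Tl.length →
          pvGetE (pvMix Pl Tl Pl.length Tl.length (Pl.length-1)) (Pl.length-1) k
            = pvD Pl Tl (Pl.length-1) k := by
        intro k hk
        unfold pvMix
        rw [pv_getE_map_range _ _ _ _ (by omega), if_pos (Nat.le_refl _)]
        unfold pvDRow
        exact pv_getD_map_range _ _ _ _ hk
      simp only [pvACore]
      rw [pv_foldl_fst _ _
          (fun (D : List (List Int)) (i : Nat) =>
            (List.range' 1 (Tl.length - 1)).foldl (pvAStep Pl Tl i) D)
          (fun st x => pv_foldl_fst _ _ (pvAStep Pl Tl x) (fun st' j => rfl) st)]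
      rw [pvA_init, pvA_outer Pl Tl Pl.length Tl.length (Pl.length - 1) (Nat.le_refl _)]
      exact congrArg (fun z : Nat => (z : Int) - (Pl.length : Int) + 2)
        (pv_argmin_congr _ _ Tl.length hfgA _ hmem 0 (by omega))
    have hB : pvBCore Pl Tl = ((List.range' 1 (Tl.length - 1)).foldl
        (fun j k => if pvD Pl Tl (Pl.length-1) k < pvD Pl Tl (Pl.length-1) j then k else j) 0 : Nat)
        - (Pl.length : Int) + 2 := by
      have hinv : pvInv Pl Tl PySem.Dict.empty := by
        intro p v hv
        simp [PySem.Dict.get?_empty] at hv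
      simp only [pvBCore]
      rw [pvB_fold Pl Tl Pl.length _ 0 _ hinv]
    rw [hA, hB]

-- ===== VERDICT (by name: the statement is the Claim_ definition above) =====
theorem matching_patterns_spec : Claim_equal_matching_patterns := by
  intro P T _ hPre
  unfold Spec_matching_patterns matching_patterns matching_patterns_alt
  exact pv_core_eq P.toList T.toList hPre
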